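-- pv_equiv track=rewrite | github.com/BraianVargas/utility_go | docs/store_procedure.py | formarSP
-- ===== SOURCE A (Python) =====
-- def formarSP(metodo, parametros):
--     inicial = ' "'
--     separador = '","'
--     ultimo = len(parametros)
--     contador = 0
--     if ultimo >0:
--         exe = metodo + inicial
--         for parametro in parametros:
--             p = str(parametro)
--             contador = contador + 1
--             if p[:1] == '&':
--                 p = p[1:]
--                 exe = exe[:-1] # QUITAR doble comilla
--                 exe += p
--                 if contador < ultimo:
--                     exe += ',"'
--             else:
--                 exe += p + separador
--                 if contador == ultimo:
--                     exe = exe[:-2]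
--         sp = exe
--     else:
--         sp = metodo
--     return(sp)
-- ===== SOURCE B (Python) =====
-- def formarSP(metodo, parametros):
--     if not parametros:
--         return metodo
--     tokens = []
--     for parametro in parametros:
--         p = str(parametro)
--         tokens.append(p[1:] if p[:1] == '&' else '"' + p + '"')
--     return metodo + ' ' + ','.join(tokens)
-- ===== Notes on version B (the rewrite author's own statement) =====
-- stated objective: simpler
-- what changed: Replaces A's position-dependent append-then-backtrack loop (counter branches with exe[:-1]/exe[:-2] quote-slicing) by independent per-parameter token formatting followed by a single ','.join.
import Mathlib
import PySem

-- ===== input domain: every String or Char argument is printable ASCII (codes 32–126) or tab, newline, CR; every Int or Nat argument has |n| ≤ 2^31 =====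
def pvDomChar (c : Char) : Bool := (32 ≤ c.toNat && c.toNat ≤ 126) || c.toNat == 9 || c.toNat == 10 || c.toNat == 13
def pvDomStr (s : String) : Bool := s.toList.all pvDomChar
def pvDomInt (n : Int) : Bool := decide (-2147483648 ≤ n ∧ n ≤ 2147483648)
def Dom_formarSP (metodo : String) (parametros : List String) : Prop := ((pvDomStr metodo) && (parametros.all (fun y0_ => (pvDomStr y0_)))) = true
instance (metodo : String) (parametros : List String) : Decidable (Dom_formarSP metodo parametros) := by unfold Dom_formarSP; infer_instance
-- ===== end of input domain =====

-- B replaces A's counter-guided append-then-backtrack string building by per-token formatting and a single join (simpler; return value proved equal).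

-- ===== PORT A =====
-- A's loop body, as a fold over the parameters with state (exe, contador); strings handled as Char lists (PySem.Chars).
def formarSPStepA (ultimo : Nat) (st : List Char × Nat) (parametro : String) : List Char × Nat :=
  let exe := st.1
  let p := parametro.toList
  let contador := st.2 + 1
  if PySem.Chars.slice p none (some 1) = ['&'] then
    let p := PySem.Chars.slice p (some 1) none
    let exe := PySem.Chars.slice exe none (some (-1))  -- QUITAR doble comilla
    let exe := exe ++ p
    let exe := if contador < ultimo then exe ++ [',', '"'] else exe
    (exe, contador)
  else
    let exe := exe ++ p ++ ['"', ',', '"']             -- p + separador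
    let exe := if contador = ultimo then PySem.Chars.slice exe none (some (-2)) else exe
    (exe, contador)

def formarSP (metodo : String) (parametros : List String) : String :=
  let ultimo := parametros.length
  if ultimo > 0 then
    let exe0 := metodo.toList ++ [' ', '"']            -- metodo + inicial
    String.ofList (parametros.foldl (formarSPStepA ultimo) (exe0, 0)).1
  else
    metodo

-- ===== PORT B =====
def formarSPTok (parametro : String) : List Char :=
  let p := parametro.toList
  if PySem.Chars.slice p none (some 1) = ['&'] then
    PySem.Chars.slice p (some 1) none
  else
    '"' :: p ++ ['"']

def formarSP_alt (metodo : String) (parametros : List String) : String :=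
  if parametros = [] then
    metodo
  else
    String.ofList (metodo.toList ++ [' '] ++ PySem.Chars.join [','] (parametros.map formarSPTok))

-- ===== PRECONDITION & SPEC =====
def Spec_formarSP (metodo : String) (parametros : List String) (out : String) : Prop := out = formarSP_alt metodo parametros
instance (metodo : String) (parametros : List String) (out : String) : Decidable (Spec_formarSP metodo parametros out) := by unfold Spec_formarSP; infer_instance

-- ===== CLAIM (what is proved, stated in full; the proofs are below) =====
def Claim_equal_formarSP : Prop := ∀ (metodo : String) (parametros : List String), Dom_formarSP metodo parametros → Spec_formarSP metodo parametros (formarSP metodo parametros)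

-- ===== LEMMAS AND PROOFS =====

-- exe[:-2] when exe ends in two known chars: drops exactly those two
lemma slice_to_neg_two_append (l : List Char) (a b : Char) :
    PySem.List.slice (l ++ [a, b]) none (some (-2)) = l := by
  rw [PySem.List.slice_to_neg_ofNat (l ++ [a, b]) 2 (by omega)]
  simp

-- Loop invariant: with the open quote pending, processing the remaining (nonempty) parameters appends exactly their ','-joined tokens.
lemma formarSP_loop (rest : List String) (acc : List Char) (k n : Nat)
    (h : k + rest.length = n) (hne : rest ≠ []) :
    (rest.foldl (formarSPStepA n) (acc ++ ['"'], k)).1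
      = acc ++ PySem.Chars.join [','] (rest.map formarSPTok) := by
  induction rest generalizing acc k with
  | nil => exact absurd rfl hne
  | cons x t ih =>
    cases t with
    | nil =>
      simp only [List.length_cons, List.length_nil, Nat.zero_add] at h
      simp only [List.foldl_cons, List.foldl_nil, List.map_cons, List.map_nil,
        PySem.Chars.join_singleton]
      unfold formarSPStepA formarSPTok
      simp only [PySem.Chars.slice_eq_listSlice]
      by_cases hamp : PySem.List.slice x.toList none (some 1) = ['&']
      · simp [hamp, h, PySem.List.slice_to_neg_one]
      · have hre : (acc ++ ['"']) ++ x.toList ++ ['"', ',', '"']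
            = (acc ++ '"' :: (x.toList ++ ['"'])) ++ [',', '"'] := by simp
        simp only [hamp, if_false, h, if_true, hre, slice_to_neg_two_append]
        simp
    | cons y t' =>
      have hk : k + 1 < n := by simp only [List.length_cons] at h; omega
      have hstep : formarSPStepA n (acc ++ ['"'], k) x
          = (acc ++ formarSPTok x ++ [','] ++ ['"'], k + 1) := by
        unfold formarSPStepA formarSPTok
        simp only [PySem.Chars.slice_eq_listSlice]
        by_cases hamp : PySem.List.slice x.toList none (some 1) = ['&']
        · simp [hamp, hk, PySem.List.slice_to_neg_one]
        · simp [hamp, Nat.ne_of_lt hk]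
      rw [List.foldl_cons, hstep,
        ih (acc ++ formarSPTok x ++ [',']) (k + 1)
          (by simp only [List.length_cons] at h ⊢; omega) (by simp)]
      simp [PySem.Chars.join_cons_cons]

-- ===== VERDICT (by name: the statement is the Claim_ definition above) =====
theorem formarSP_spec : Claim_equal_formarSP := by
  intro metodo parametros _
  unfold Spec_formarSP formarSP formarSP_alt
  cases parametros with
  | nil => simp
  | cons x t =>
    have h := formarSP_loop (x :: t) (metodo.toList ++ [' ']) 0 (t.length + 1)
      (by simp) (by simp)
    have hacc : metodo.toList ++ [' ', '"'] = (metodo.toList ++ [' ']) ++ ['"'] := by simp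
    simp only [List.length_cons, gt_iff_lt, Nat.succ_pos, if_true,
      reduceCtorEq, if_false, hacc, h]
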